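-- pv_equiv track=rewrite | github.com/j-raghavan/mastering-performant-code | src/chapter_08/applications.py | _is_prefix_match
-- ===== SOURCE A (Python) =====
-- def _is_prefix_match(route: str, destination: str) -> int:
--     """Return the number of matching octets if route is a prefix of destination, else 0."""
--     route_parts = route.split('.')
--     dest_parts = destination.split('.')
--     match_len = 0
--     for r, d in zip(route_parts, dest_parts):
--         if r == d:
--             match_len += 1
--         else:
--             break
--     return match_len if match_len == len(route_parts) else 0
-- ===== SOURCE B (Python) =====
-- def _is_prefix_match(route: str, destination: str) -> int:
--     """Return the number of matching octets if route is a prefix of destination, else 0."""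
--     if destination == route or destination.startswith(route + '.'):
--         return route.count('.') + 1
--     return 0
-- ===== Notes on version B (the rewrite author's own statement) =====
-- stated objective: alternative
-- what changed: B never splits the strings: it tests the dot-prefix property directly at string level (destination == route or destination.startswith(route + '.')) and returns route.count('.') + 1, so the octet lists, the zip loop, the counter and the length check all disappear.
import Mathlib
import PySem

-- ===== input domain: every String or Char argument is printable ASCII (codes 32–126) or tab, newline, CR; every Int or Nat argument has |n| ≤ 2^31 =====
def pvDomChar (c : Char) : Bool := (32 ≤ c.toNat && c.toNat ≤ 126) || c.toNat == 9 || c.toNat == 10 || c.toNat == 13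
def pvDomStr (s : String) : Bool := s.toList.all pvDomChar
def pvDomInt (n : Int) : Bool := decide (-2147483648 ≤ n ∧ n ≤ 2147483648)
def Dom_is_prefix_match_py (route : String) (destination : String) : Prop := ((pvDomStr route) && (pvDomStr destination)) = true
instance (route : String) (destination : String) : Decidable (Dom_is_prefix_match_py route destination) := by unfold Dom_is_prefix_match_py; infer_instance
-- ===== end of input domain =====

-- B never splits: it tests the dot-prefix property at string level and counts the dots (objective: alternative).

-- ===== PORT A =====
-- the 'for r, d in zip(...): if r == d: match_len += 1 else: break' loop, as structural recursion
def pvALoop : List (List Char × List Char) → Int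
  | [] => 0
  | (r, d) :: rest => if r == d then 1 + pvALoop rest else 0

def is_prefix_match_py (route : String) (destination : String) : Int :=
  let route_parts := PySem.Chars.splitOn route.toList ['.']
  let dest_parts := PySem.Chars.splitOn destination.toList ['.']
  let match_len := pvALoop (route_parts.zip dest_parts)
  if match_len = (route_parts.length : Int) then match_len else 0

-- ===== PORT B =====
def is_prefix_match_py_alt (route : String) (destination : String) : Int :=
  if destination == route || PySem.Chars.startswith destination.toList (route.toList ++ ['.'])
  then (PySem.Chars.count route.toList ['.'] : Int) + 1
  else 0

-- ===== PRECONDITION & SPEC =====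
def Spec_is_prefix_match_py (route : String) (destination : String) (out : Int) : Prop := out = is_prefix_match_py_alt route destination
instance (route : String) (destination : String) (out : Int) : Decidable (Spec_is_prefix_match_py route destination out) := by unfold Spec_is_prefix_match_py; infer_instance

-- ===== CLAIM (what is proved, stated in full; the proofs are below) =====
def Claim_equal_is_prefix_match_py : Prop := ∀ (route : String) (destination : String), Dom_is_prefix_match_py route destination → Spec_is_prefix_match_py route destination (is_prefix_match_py route destination)

-- ===== LEMMAS AND PROOFS =====

-- reference splitter for a single-character separator '.'
def pvSplit : List Char → List (List Char)
  | [] => [[]]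
  | c :: rest =>
    if c = '.' then [] :: pvSplit rest
    else
      match pvSplit rest with
      | [] => [[c]]
      | h :: t => (c :: h) :: t

theorem pvSplit_ne_nil (s : List Char) : pvSplit s ≠ [] := by
  cases s with
  | nil => simp [pvSplit]
  | cons c rest =>
    simp only [pvSplit]
    split
    · simp
    · split
      · simp
      · simp

theorem splitOn_go_eq (fuel : Nat) :
    ∀ (l cur : List Char) (acc : List (List Char)), l.length ≤ fuel →
      PySem.Chars.splitOn.go ['.'] fuel l cur acc
        = acc.reverse ++ (pvSplit l).modifyHead (cur.reverse ++ ·) := by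
  induction fuel with
  | zero =>
    intro l cur acc h
    have : l = [] := List.length_eq_zero_iff.mp (Nat.le_zero.mp h)
    subst this
    simp [PySem.Chars.splitOn.go, pvSplit]
  | succ n ih =>
    intro l cur acc h
    cases l with
    | nil => simp [PySem.Chars.splitOn.go, pvSplit]
    | cons c rest =>
      by_cases hc : c = '.'
      · subst hc
        have hpre : List.isPrefixOf ['.'] ('.' :: rest) = true := by
          simp [List.isPrefixOf]
        rw [show PySem.Chars.splitOn.go ['.'] (n+1) ('.' :: rest) cur acc
              = PySem.Chars.splitOn.go ['.'] n (List.drop (List.length ['.']) ('.' :: rest)) [] (cur.reverse :: acc) by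
            simp [PySem.Chars.splitOn.go, hpre]]
        have hlen : rest.length ≤ n := by simp at h; omega
        rw [show List.drop (List.length ['.']) ('.' :: rest) = rest from rfl]
        rw [ih rest [] (cur.reverse :: acc) hlen]
        cases hrest : pvSplit rest <;> simp [pvSplit, hrest]
      · have hpre : List.isPrefixOf ['.'] (c :: rest) = false := by
          simp [List.isPrefixOf]
          intro h'; exact hc h'.symm
        rw [show PySem.Chars.splitOn.go ['.'] (n+1) (c :: rest) cur acc
              = PySem.Chars.splitOn.go ['.'] n rest (c :: cur) acc by
            simp [PySem.Chars.splitOn.go, hpre]]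
        have hlen : rest.length ≤ n := by simp at h; omega
        rw [ih rest (c :: cur) acc hlen]
        have hne := pvSplit_ne_nil rest
        cases hrest : pvSplit rest with
        | nil => exact absurd hrest hne
        | cons hh tt => simp [pvSplit, hc, hrest]

theorem splitOn_eq_pvSplit (s : List Char) :
    PySem.Chars.splitOn s ['.'] = pvSplit s := by
  unfold PySem.Chars.splitOn
  rw [splitOn_go_eq (s.length + 1) s [] [] (Nat.le_succ _)]
  cases h : pvSplit s with
  | nil => exact absurd h (pvSplit_ne_nil s)
  | cons hh tt => simp

theorem pvSplit_length (s : List Char) :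
    (pvSplit s).length = s.count '.' + 1 := by
  induction s with
  | nil => simp [pvSplit]
  | cons c rest ih =>
    by_cases hc : c = '.'
    · subst hc; simp [pvSplit, ih]
    · have hne := pvSplit_ne_nil rest
      cases hrest : pvSplit rest with
      | nil => exact absurd hrest hne
      | cons hh tt =>
        simp only [pvSplit, if_neg hc, hrest]
        rw [hrest] at ih
        simp only [List.length_cons] at ih ⊢
        rw [List.count_cons]
        simp [hc, ih]

-- Chars.count with a single-character pattern is List.count
theorem count_go_single (fuel : Nat) :
    ∀ (l : List Char) (acc : Nat), l.length ≤ fuel →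
      PySem.Chars.count.go ['.'] fuel l acc = acc + l.count '.' := by
  induction fuel with
  | zero =>
    intro l acc h
    have : l = [] := List.length_eq_zero_iff.mp (Nat.le_zero.mp h)
    subst this; simp [PySem.Chars.count.go]
  | succ n ih =>
    intro l acc h
    cases l with
    | nil => simp [PySem.Chars.count.go]
    | cons c rest =>
      have hlen : rest.length ≤ n := by simp at h; omega
      by_cases hc : c = '.'
      · subst hc
        have hpre : List.isPrefixOf ['.'] ('.' :: rest) = true := by simp [List.isPrefixOf]
        rw [show PySem.Chars.count.go ['.'] (n+1) ('.' :: rest) acc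
              = PySem.Chars.count.go ['.'] n (List.drop (List.length ['.']) ('.' :: rest)) (acc + 1) by
            simp [PySem.Chars.count.go, hpre]]
        rw [show List.drop (List.length ['.']) ('.' :: rest) = rest from rfl]
        rw [ih rest (acc + 1) hlen]
        simp
        omega
      · have hpre : List.isPrefixOf ['.'] (c :: rest) = false := by
          simp [List.isPrefixOf]
          intro h'; exact hc h'.symm
        rw [show PySem.Chars.count.go ['.'] (n+1) (c :: rest) acc
              = PySem.Chars.count.go ['.'] n rest acc by
            simp [PySem.Chars.count.go, hpre]]
        rw [ih rest acc hlen]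
        simp [hc]

theorem chars_count_dot (s : List Char) :
    PySem.Chars.count s ['.'] = s.count '.' := by
  unfold PySem.Chars.count
  simp only [List.isEmpty_cons, Bool.false_eq_true, if_false]
  simpa using count_go_single s.length s 0 (le_refl _)

-- A's loop reaches the full route length exactly when route_parts is a prefix of dest_parts.
theorem pvALoop_eq_len_iff (rp dp : List (List Char)) :
    (pvALoop (rp.zip dp) = (rp.length : Int)) ↔ dp.take rp.length = rp := by
  induction rp generalizing dp with
  | nil => simp [pvALoop]
  | cons r rs ih =>
    cases dp with
    | nil =>
      simp only [List.zip_nil_right, pvALoop, List.take_nil, List.length_cons]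
      constructor
      · intro h; omega
      · intro h; exact absurd h (by simp)
    | cons d ds =>
      simp only [List.zip_cons_cons, pvALoop, List.length_cons, List.take_succ_cons]
      by_cases hrd : r = d
      · subst hrd
        simp only [beq_self_eq_true, if_true]
        rw [List.cons_eq_cons, ← ih ds]
        constructor
        · intro h
          exact ⟨rfl, by push_cast at h ⊢; omega⟩
        · rintro ⟨-, h⟩
          rw [h]; push_cast; ring
      · have : (r == d) = false := by simp [hrd]
        simp only [this, Bool.false_eq_true, if_false]
        constructor
        · intro h; exfalso; omega
        · intro h
          exact absurd (List.cons.inj h).1.symm hrd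

-- split-level prefix condition ↔ string-level condition
theorem take_pvSplit_iff (r : List Char) :
    ∀ d : List Char,
      ((pvSplit d).take (pvSplit r).length = pvSplit r) ↔ (d = r ∨ (r ++ ['.']) <+: d) := by
  induction r with
  | nil =>
    intro d
    cases d with
    | nil => simp [pvSplit]
    | cons b d' =>
      by_cases hb : b = '.'
      · subst hb
        simp [pvSplit, List.prefix_cons_iff]
      · obtain ⟨hh, tt, hd'⟩ : ∃ hh tt, pvSplit d' = hh :: tt := by
          cases hd' : pvSplit d' with
          | nil => exact absurd hd' (pvSplit_ne_nil d')
          | cons x y => exact ⟨x, y, rfl⟩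
        simp only [pvSplit, if_neg hb, hd']
        constructor
        · intro h; exfalso; simp at h
        · rintro (h | ⟨t, ht⟩)
          · exact absurd h (by simp)
          · exfalso
            simp only [List.nil_append, List.cons_append] at ht
            exact hb (List.cons.inj ht).1.symm
  | cons a r' ih =>
    intro d
    cases d with
    | nil =>
      constructor
      · intro h
        have hlen := congrArg List.length h
        simp only [pvSplit, List.length_take] at hlen
        by_cases ha : a = '.'
        · subst ha
          simp only [pvSplit, List.length_cons] at h hlen
          -- take from [[]] has length ≤ 1, but pvSplit ('.'::r') has length ≥ 1 head [] plus…
          have h1 : (pvSplit [] ).take (pvSplit r').length.succ = [] :: pvSplit r' := by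
            simpa [pvSplit] using h
          simp only [pvSplit] at h1
          cases hr' : pvSplit r' with
          | nil => exact absurd hr' (pvSplit_ne_nil r')
          | cons x y =>
            rw [hr'] at h1
            simp at h1
        · have hne := pvSplit_ne_nil r'
          cases hr' : pvSplit r' with
          | nil => exact absurd hr' hne
          | cons x y =>
            simp only [pvSplit, if_neg ha, hr'] at h
            simp at h
      · rintro (h | h)
        · exact absurd h (by simp)
        · exact absurd h (by simp)
    | cons b d' =>
      by_cases hab : a = b
      · subst hab
        have key : ((pvSplit (a :: d')).take (pvSplit (a :: r')).length = pvSplit (a :: r'))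
            ↔ ((pvSplit d').take (pvSplit r').length = pvSplit r') := by
          by_cases ha : a = '.'
          · subst ha
            simp [pvSplit]
          · obtain ⟨hh, tt, hr'⟩ : ∃ hh tt, pvSplit r' = hh :: tt := by
              cases hr' : pvSplit r' with
              | nil => exact absurd hr' (pvSplit_ne_nil r')
              | cons x y => exact ⟨x, y, rfl⟩
            obtain ⟨hh', tt', hd'⟩ : ∃ hh tt, pvSplit d' = hh :: tt := by
              cases hd' : pvSplit d' with
              | nil => exact absurd hd' (pvSplit_ne_nil d')
              | cons x y => exact ⟨x, y, rfl⟩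
            simp [pvSplit, if_neg ha, hr', hd']
        rw [key, ih d']
        constructor
        · rintro (h | h)
          · exact Or.inl (by rw [h])
          · refine Or.inr ?_
            rcases h with ⟨t, ht⟩
            exact ⟨t, by simpa using ht⟩
        · rintro (h | h)
          · exact Or.inl (List.cons.inj h).2
          · rcases h with ⟨t, ht⟩
            simp only [List.cons_append, List.cons_eq_cons] at ht
            exact Or.inr ⟨t, ht.2⟩
      · constructor
        · intro h
          exfalso
          -- heads of the two splits start with different characters
          by_cases ha : a = '.'
          · subst ha
            by_cases hb : b = '.'
            · exact hab hb.symm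
            · obtain ⟨hh', tt', hd'⟩ : ∃ hh tt, pvSplit d' = hh :: tt := by
                cases hd' : pvSplit d' with
                | nil => exact absurd hd' (pvSplit_ne_nil d')
                | cons x y => exact ⟨x, y, rfl⟩
              simp only [pvSplit, if_neg hb, hd'] at h
              exact (by simp at h : False)
          · obtain ⟨hh, tt, hr'⟩ : ∃ hh tt, pvSplit r' = hh :: tt := by
              cases hr' : pvSplit r' with
              | nil => exact absurd hr' (pvSplit_ne_nil r')
              | cons x y => exact ⟨x, y, rfl⟩
            by_cases hb : b = '.'
            · subst hb
              simp only [pvSplit, if_neg ha, hr'] at h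
              exact (by simp at h : False)
            · obtain ⟨hh', tt', hd'⟩ : ∃ hh tt, pvSplit d' = hh :: tt := by
                cases hd' : pvSplit d' with
                | nil => exact absurd hd' (pvSplit_ne_nil d')
                | cons x y => exact ⟨x, y, rfl⟩
              simp only [pvSplit, if_neg ha, if_neg hb, hr', hd', List.length_cons,
                List.take_succ_cons, List.cons_eq_cons] at h
              exact hab h.1.1.symm
        · rintro (h | h)
          · exact absurd (List.cons.inj h).1.symm hab
          · rcases h with ⟨t, ht⟩
            simp only [List.cons_append, List.cons_eq_cons] at ht
            exact absurd ht.1 hab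

-- ===== VERDICT (by name: the statement is the Claim_ definition above) =====
theorem is_prefix_match_py_spec : Claim_equal_is_prefix_match_py := by
  intro route destination _
  unfold Spec_is_prefix_match_py is_prefix_match_py is_prefix_match_py_alt
  simp only [splitOn_eq_pvSplit]
  have hiff :
      (pvALoop ((pvSplit route.toList).zip (pvSplit destination.toList)) = ((pvSplit route.toList).length : Int))
        ↔ (destination.toList = route.toList ∨ (route.toList ++ ['.']) <+: destination.toList) := by
    rw [pvALoop_eq_len_iff, take_pvSplit_iff]
  have hcond :
      (destination == route || PySem.Chars.startswith destination.toList (route.toList ++ ['.'])) = true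
        ↔ (destination.toList = route.toList ∨ (route.toList ++ ['.']) <+: destination.toList) := by
    rw [Bool.or_eq_true, PySem.Chars.startswith_iff, beq_iff_eq]
    constructor
    · rintro (h | h)
      · exact Or.inl (by rw [h])
      · exact Or.inr h
    · rintro (h | h)
      · exact Or.inl (String.toList_inj.mp h)
      · exact Or.inr h
  by_cases h : destination.toList = route.toList ∨ (route.toList ++ ['.']) <+: destination.toList
  · rw [if_pos (hiff.mpr h), if_pos (hcond.mpr h), hiff.mpr h]
    rw [pvSplit_length, chars_count_dot]
    push_cast; ring
  · rw [if_neg (fun hc => h (hiff.mp hc))]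
    rw [if_neg (fun hc => h (hcond.mp hc))]
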